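-- pv_equiv track=rewrite | github.com/andrewhpark25/cs-sprint-challenge-hash-tables | hashtables/ex5/ex5.py | finder
-- ===== SOURCE A (Python) =====
-- def finder(files, queries):
--     """
--     YOUR CODE HERE
--     """
--     # Your code here
--
--     cache = dict()
--     result = []
--
--     for path in files:
--         item = path.split('/')[-1]
--         # append path if item in cache
--         if item in cache:
--             cache[item].append(path)
--         # create a list with path if not
--         else:
--             cache[item] = [path]
--       # check if each query in cache
--     for query in queries:
--         if query in cache:
--             # add to result if in cache
--            result.extend(cache[query])
--
--     return result
-- ===== SOURCE B (Python) =====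
-- def finder(files, queries):
--     # Simpler: no dictionary; compute each basename once, then for each query
--     # scan the (basename, path) pairs and append matches in order.
--     pairs = [(path.split('/')[-1], path) for path in files]
--     result = []
--     for query in queries:
--         for base, path in pairs:
--             if base == query:
--                 result.append(path)
--     return result
-- ===== Notes on version B (the rewrite author's own statement) =====
-- stated objective: simpler
-- what changed: Replaced the basename-indexed dict built in a first pass (then queried in a second pass) by a nested loop: basenames are computed once, then for each query the (basename, path) pairs are scanned and matches appended in order.
import Mathlib
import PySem

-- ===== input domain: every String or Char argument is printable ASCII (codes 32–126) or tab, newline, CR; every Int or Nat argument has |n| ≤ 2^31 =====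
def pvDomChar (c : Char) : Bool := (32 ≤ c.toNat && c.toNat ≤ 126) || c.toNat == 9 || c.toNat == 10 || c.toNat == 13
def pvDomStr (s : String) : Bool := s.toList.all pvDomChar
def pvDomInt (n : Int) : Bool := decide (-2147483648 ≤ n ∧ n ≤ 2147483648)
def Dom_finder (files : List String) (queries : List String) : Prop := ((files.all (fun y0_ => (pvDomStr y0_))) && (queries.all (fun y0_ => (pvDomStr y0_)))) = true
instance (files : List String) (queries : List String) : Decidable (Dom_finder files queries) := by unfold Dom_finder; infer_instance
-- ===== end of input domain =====

-- B replaces A's two-pass dict grouping by a simpler nested scan (queries outer, files inner); return values proved equal.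

-- path.split('/')[-1]; split on a nonempty separator is never empty, so the [-1] cannot raise and the getD default is never used
def pyBasename (path : String) : String :=
  (PySem.List.pyGet? ((PySem.Str.split? path "/").getD []) (-1)).getD ""

-- ===== PORT A =====
def finder (files : List String) (queries : List String) : List String :=
  let cache : PySem.Dict String (List String) :=
    files.foldl (fun cache path =>
      let item := pyBasename path
      if cache.contains item then
        cache.insert item (cache.getD item [] ++ [path])   -- cache[item].append(path)
      else
        cache.insert item [path]) PySem.Dict.empty
  queries.foldl (fun result query =>
    if cache.contains query then result ++ cache.getD query [] else result) []

-- ===== PORT B =====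
def finder_alt (files : List String) (queries : List String) : List String :=
  let pairs := files.map (fun path => (pyBasename path, path))
  queries.foldl (fun result query =>
    pairs.foldl (fun result bp =>
      if bp.1 = query then result ++ [bp.2] else result) result) []

-- ===== PRECONDITION & SPEC =====
def Spec_finder (files : List String) (queries : List String) (out : List String) : Prop := out = finder_alt files queries
instance (files : List String) (queries : List String) (out : List String) : Decidable (Spec_finder files queries out) := by unfold Spec_finder; infer_instance

-- ===== CLAIM (what is proved, stated in full; the proofs are below) =====
def Claim_equal_finder : Prop := ∀ (files : List String) (queries : List String), Dom_finder files queries → Spec_finder files queries (finder files queries)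

-- ===== LEMMAS AND PROOFS =====

def cacheStep (cache : PySem.Dict String (List String)) (path : String) : PySem.Dict String (List String) :=
  if cache.contains (pyBasename path) then
    cache.insert (pyBasename path) (cache.getD (pyBasename path) [] ++ [path])
  else
    cache.insert (pyBasename path) [path]

lemma contains_cacheFold (files : List String) (d : PySem.Dict String (List String)) (q : String) :
    (files.foldl cacheStep d).contains q = (d.contains q || files.any (fun p => pyBasename p == q)) := by
  induction files generalizing d with
  | nil => simp
  | cons x xs ih =>
    simp only [List.foldl_cons, List.any_cons, ih]
    have hstep : (cacheStep d x).contains q = (q == pyBasename x || d.contains q) := by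
      unfold cacheStep
      split <;> simp [PySem.Dict.contains_insert]
    rw [hstep]
    by_cases hq : q = pyBasename x
    · simp [hq]
    · have h1 : (q == pyBasename x) = false := by simpa [beq_eq_false_iff_ne] using hq
      have h2 : (pyBasename x == q) = false := by
        simp only [beq_eq_false_iff_ne, ne_eq]
        exact fun h => hq h.symm
      simp [h1, h2, Bool.or_assoc]

lemma getD_cacheFold (files : List String) (d : PySem.Dict String (List String)) (q : String) :
    (files.foldl cacheStep d).getD q [] =
      d.getD q [] ++ files.filter (fun p => pyBasename p == q) := by
  induction files generalizing d with
  | nil => simp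
  | cons x xs ih =>
    simp only [List.foldl_cons, ih, List.filter_cons]
    have hstep : (cacheStep d x).getD q [] =
        d.getD q [] ++ (if pyBasename x == q then [x] else []) := by
      unfold cacheStep
      by_cases hq : q = pyBasename x
      · subst hq
        by_cases hc : d.contains (pyBasename x) = true
        · simp [hc, PySem.Dict.getD_insert]
        · have hc' : d.contains (pyBasename x) = false := by simpa using hc
          simp [hc', PySem.Dict.getD_of_not_contains]
      · have hb : (pyBasename x == q) = false := by
          simp only [beq_eq_false_iff_ne, ne_eq]
          exact fun h => hq h.symm
        split <;> simp [PySem.Dict.getD_insert, hq, hb]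
    rw [hstep]
    cases hb : (pyBasename x == q) <;> simp

lemma filter_eq_nil_of_not_any (files : List String) (q : String)
    (h : files.any (fun p => pyBasename p == q) = false) :
    files.filter (fun p => pyBasename p == q) = [] := by
  simp only [List.any_eq_false] at h
  simp [List.filter_eq_nil_iff]
  intro p hp
  simpa using h p hp

lemma foldB (files : List String) (q : String) (acc : List String) :
    (files.map (fun path => (pyBasename path, path))).foldl
      (fun result bp => if bp.1 = q then result ++ [bp.2] else result) acc =
    acc ++ files.filter (fun p => pyBasename p == q) := by
  induction files generalizing acc with
  | nil => simp
  | cons x xs ih =>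
    simp only [List.map_cons, List.foldl_cons, List.filter_cons, ih]
    by_cases h : pyBasename x = q <;> simp [h]

lemma finder_eq_alt (files : List String) (qs : List String) :
    qs.foldl (fun result query =>
      if (files.foldl cacheStep PySem.Dict.empty).contains query then
        result ++ (files.foldl cacheStep PySem.Dict.empty).getD query [] else result) [] =
    finder_alt files qs := by
  induction qs using List.reverseRecOn with
  | nil => rfl
  | append_singleton qs q ih =>
    unfold finder_alt
    rw [List.foldl_append, List.foldl_append, List.foldl_cons, List.foldl_nil,
        List.foldl_cons, List.foldl_nil, ih]
    unfold finder_alt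
    rw [foldB, contains_cacheFold, getD_cacheFold]
    simp only [PySem.Dict.contains_empty, PySem.Dict.getD_empty, Bool.false_or, List.nil_append]
    cases ha : files.any (fun p => pyBasename p == q) with
    | true => simp
    | false => simp [filter_eq_nil_of_not_any files q ha]

-- ===== VERDICT (by name: the statement is the Claim_ definition above) =====
theorem finder_spec : Claim_equal_finder := by
  intro files queries _
  exact finder_eq_alt files queries
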